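-- pv_equiv track=rewrite | github.com/daniel-reich/ubiquitous-fiesta | KBmKcorkjbuXds6Jo_23.py | chocolates_parcel
-- ===== SOURCE A (Python) =====
-- def chocolates_parcel(n_small, n_big, order):
--   s = n_small*2
--
--   while n_big>=0:
--     x = (order-(n_big*5))
--     if s >= x and not x%2 and x>=0:
--       return x//2
--     n_big -= 1
--   return -1
-- ===== SOURCE B (Python) =====
-- def chocolates_parcel(n_small, n_big, order):
--     hi = min(n_big, order // 5)
--     if hi % 2 != order % 2:
--         hi -= 1
--     if hi < 0 or order - 5 * hi > 2 * n_small: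
--         return -1
--     return (order - 5 * hi) // 2
-- ===== Notes on version B (the rewrite author's own statement) =====
-- stated objective: faster
-- what changed: Replaced A's downward linear scan over all big-box counts with O(1) closed-form arithmetic: take the largest count within min(n_big, order//5) with the parity of order and check the remaining-small-halves bound directly.
import Mathlib
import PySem

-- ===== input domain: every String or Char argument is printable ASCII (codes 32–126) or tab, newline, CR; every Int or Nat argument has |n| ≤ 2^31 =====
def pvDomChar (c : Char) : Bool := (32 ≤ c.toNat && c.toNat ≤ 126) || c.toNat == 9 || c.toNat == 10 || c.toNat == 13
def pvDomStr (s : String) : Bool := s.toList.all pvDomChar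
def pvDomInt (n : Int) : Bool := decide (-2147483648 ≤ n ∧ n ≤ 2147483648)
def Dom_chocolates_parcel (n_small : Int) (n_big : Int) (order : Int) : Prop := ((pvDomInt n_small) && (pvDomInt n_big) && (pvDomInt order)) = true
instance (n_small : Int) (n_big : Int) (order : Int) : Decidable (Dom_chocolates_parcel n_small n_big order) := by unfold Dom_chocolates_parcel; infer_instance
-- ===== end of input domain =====

-- B replaces A's downward scan over big-box counts by O(1) closed-form arithmetic (largest feasible count by parity/bounds); objective: faster (asymptotic).


-- ===== PORT A =====
-- the while-loop of A: n_big counts down; terminates because n_big.toNat decreases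
def chocolatesLoopA (s : Int) (order : Int) (n_big : Int) : Int :=
  if h : n_big ≥ 0 then
    let x := order - n_big * 5
    if s ≥ x ∧ PySem.Int.mod x 2 = 0 ∧ x ≥ 0 then
      PySem.Int.floordiv x 2
    else
      chocolatesLoopA s order (n_big - 1)
  else
    -1
termination_by (n_big + 1).toNat
decreasing_by omega

def chocolates_parcel (n_small : Int) (n_big : Int) (order : Int) : Int :=
  let s := n_small * 2
  chocolatesLoopA s order n_big

-- ===== PORT B =====
def chocolates_parcel_alt (n_small : Int) (n_big : Int) (order : Int) : Int :=
  let hi0 := min n_big (PySem.Int.floordiv order 5)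
  let hi := if PySem.Int.mod hi0 2 ≠ PySem.Int.mod order 2 then hi0 - 1 else hi0
  if hi < 0 ∨ order - 5 * hi > 2 * n_small then -1
  else PySem.Int.floordiv (order - 5 * hi) 2

-- ===== PRECONDITION & SPEC =====
def Spec_chocolates_parcel (n_small : Int) (n_big : Int) (order : Int) (out : Int) : Prop := out = chocolates_parcel_alt n_small n_big order
instance (n_small : Int) (n_big : Int) (order : Int) (out : Int) : Decidable (Spec_chocolates_parcel n_small n_big order out) := by unfold Spec_chocolates_parcel; infer_instance

-- ===== CLAIM (what is proved, stated in full; the proofs are below) =====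
def Claim_equal_chocolates_parcel : Prop := ∀ (n_small : Int) (n_big : Int) (order : Int), Dom_chocolates_parcel n_small n_big order → Spec_chocolates_parcel n_small n_big order (chocolates_parcel n_small n_big order)

-- ===== LEMMAS AND PROOFS =====

lemma chocolates_loop_eq (n_small order : Int) :
    ∀ (k : Nat) (nb : Int), nb < (k : Int) →
      chocolatesLoopA (n_small * 2) order nb = chocolates_parcel_alt n_small nb order := by
  intro k
  induction k with
  | zero =>
      intro nb hnb
      unfold chocolatesLoopA
      simp only [chocolates_parcel_alt,
        PySem.Int.floordiv_eq_ediv_of_pos (a := order) (by omega : (0:Int) < 5),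
        PySem.Int.mod_eq_emod_of_pos (b := (2:Int)) (by omega : (0:Int) < 2)]
      have hq : 5 * (order / 5) ≤ order := by omega
      split_ifs <;> omega
  | succ k ih =>
      intro nb hnb
      by_cases hpos : nb ≥ 0
      · unfold chocolatesLoopA
        simp only [hpos, dite_true]
        have hq5 : 0 < (5:Int) := by omega
        have hq2 : 0 < (2:Int) := by omega
        split_ifs with hret
        · obtain ⟨h1, h2, h3⟩ := hret
          rw [PySem.Int.mod_eq_emod_of_pos hq2] at h2
          rw [PySem.Int.floordiv_eq_ediv_of_pos hq2]
          -- show the closed form picks exactly hi = nb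
          simp only [chocolates_parcel_alt,
            PySem.Int.floordiv_eq_ediv_of_pos (a := order) hq5,
            PySem.Int.floordiv_eq_ediv_of_pos (b := (2:Int)) hq2,
            PySem.Int.mod_eq_emod_of_pos hq2]
          have hmin : min nb (order / 5) = nb := by
            have : 5 * (order / 5) ≤ order ∧ order < 5 * (order / 5) + 5 := by omega
            omega
          rw [hmin]
          have hpar : nb % 2 = order % 2 := by omega
          simp only [hpar, ne_eq, not_true_eq_false, if_false]
          have : ¬ (nb < 0 ∨ order - 5 * nb > 2 * n_small) := by omega
          rw [if_neg this]
          congr 1; omega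
        · rw [ih (nb - 1) (by omega)]
          -- closed form is unchanged when the guard fails at nb
          simp only [PySem.Int.mod_eq_emod_of_pos hq2] at hret
          simp only [chocolates_parcel_alt,
            PySem.Int.floordiv_eq_ediv_of_pos (a := order) hq5,
            PySem.Int.floordiv_eq_ediv_of_pos (b := (2:Int)) hq2,
            PySem.Int.mod_eq_emod_of_pos hq2]
          have hq : 5 * (order / 5) ≤ order ∧ order < 5 * (order / 5) + 5 := by omega
          by_cases hlt : order / 5 < nb
          · -- min unchanged between nb and nb-1
            have h1 : min nb (order / 5) = order / 5 := by omega
            have h2 : min (nb - 1) (order / 5) = order / 5 := by omega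
            rw [h1, h2]
          · have h1 : min nb (order / 5) = nb := by omega
            have h2 : min (nb - 1) (order / 5) = nb - 1 := by omega
            rw [h1, h2]
            have hx0 : order - nb * 5 ≥ 0 := by omega
            by_cases hpar : nb % 2 = order % 2
            · -- guard failed because s < x; every smaller candidate has larger x
              have hs : ¬ n_small * 2 ≥ order - nb * 5 := by
                intro hc; exact hret ⟨hc, by omega, hx0⟩
              have hp1 : ¬ (nb - 1) % 2 = order % 2 := by omega
              simp only [hpar, ne_eq, not_true_eq_false, if_false, hp1,
                not_false_eq_true, if_true]
              have hl : (nb < 0 ∨ order - 5 * nb > 2 * n_small) := by omega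
              have hr : (nb - 1 - 1 < 0 ∨ order - 5 * (nb - 1 - 1) > 2 * n_small) := by omega
              rw [if_pos hl, if_pos hr]
            · -- parity mismatch at nb: both sides use hi = nb - 1
              have hp1 : (nb - 1) % 2 = order % 2 := by omega
              simp only [hpar, ne_eq, not_false_eq_true, if_true, hp1,
                not_true_eq_false, if_false]
      · unfold chocolatesLoopA
        simp only [hpos, dite_false]
        simp only [chocolates_parcel_alt,
          PySem.Int.floordiv_eq_ediv_of_pos (a := order) (by omega : (0:Int) < 5),
          PySem.Int.mod_eq_emod_of_pos (b := (2:Int)) (by omega : (0:Int) < 2)]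
        split_ifs <;> omega

-- ===== VERDICT (by name: the statement is the Claim_ definition above) =====
theorem chocolates_parcel_spec : Claim_equal_chocolates_parcel := by
  intro n_small n_big order _
  unfold Spec_chocolates_parcel chocolates_parcel
  exact chocolates_loop_eq n_small order (n_big.toNat + 1) n_big (by omega)
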